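-- pv_equiv track=rewrite | github.com/mirenk0/Algorithmic-Problems | 4-Hashing/nopair.py | find
-- ===== SOURCE A (Python) =====
-- def find(t):
--     dict = {}
--
--     for x in t:
--         if x not in dict:
--             dict[x] = 0
--
--         dict[x] += 1
--
--     least = t[0]
--     for x in t:
--         if dict[x] < dict[least] or (dict[x] == dict[least]):
--             least = x
--
--     return least
-- ===== SOURCE B (Python) =====
-- def find(t):
--     counts = {}
--     for x in t:
--         counts[x] = counts.get(x, 0) + 1
--     m = min(counts.values())
--     for x in reversed(t):
--         if counts[x] == m:
--             return x
-- ===== Notes on version B (the rewrite author's own statement) =====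
-- stated objective: faster
-- what changed: A keeps a running 'least' updated on every element whose count is <= the current one (two dict lookups and a branch per element over the whole list); B computes the minimum frequency once from the counter's values and returns the first element of reversed(t) with that frequency (one lookup per element, early exit).
-- outside the precondition, e.g. on find([]): A raises IndexError, B raises ValueError
import Mathlib
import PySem

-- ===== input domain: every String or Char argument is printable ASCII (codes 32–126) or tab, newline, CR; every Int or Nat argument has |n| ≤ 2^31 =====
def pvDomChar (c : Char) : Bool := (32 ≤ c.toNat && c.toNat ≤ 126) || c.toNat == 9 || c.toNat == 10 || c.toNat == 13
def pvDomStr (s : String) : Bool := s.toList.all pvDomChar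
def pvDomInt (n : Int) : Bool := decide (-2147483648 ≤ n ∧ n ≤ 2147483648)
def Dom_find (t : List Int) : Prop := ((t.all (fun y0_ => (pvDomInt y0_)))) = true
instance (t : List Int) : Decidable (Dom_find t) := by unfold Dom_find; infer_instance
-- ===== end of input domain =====

-- B replaces A's running ≤-update scan by: build the counter, take the minimum
-- frequency, and return the first element of reversed(t) having that frequency
-- (same value, different decomposition; equivalence of RETURN values on nonempty t).

-- ===== PORT A =====
def find (t : List Int) : Int :=
  let d := t.foldl (fun d x =>
      let d := if d.contains x = false then d.insert x (0 : Int) else d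
      d.insert x (d.getD x 0 + 1)) PySem.Dict.empty
  let least := PySem.List.pyGetD t 0 0   -- t[0]; Python raises IndexError on empty t (excluded by Pre_)
  t.foldl (fun least x =>
      if d.getD x 0 < d.getD least 0 ∨ d.getD x 0 = d.getD least 0 then x else least) least

-- ===== PORT B =====
def find_alt (t : List Int) : Int :=
  let counts : PySem.Dict Int Int :=
    t.foldl (fun d x => d.insert x (d.getD x 0 + 1)) PySem.Dict.empty
  let m := (PySem.List.min? counts.values (fun v => v)).getD 0   -- min() raises ValueError on empty (excluded by Pre_)
  (t.reverse.find? (fun x => counts.getD x 0 == m)).getD 0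

-- ===== PRECONDITION & SPEC =====
-- On the empty list A raises IndexError (t[0]) and B raises ValueError (min of no values).
def Pre_find (t : List Int) : Prop := t ≠ []
instance (t : List Int) : Decidable (Pre_find t) := by unfold Pre_find; infer_instance
def pvWitness_find : List Int := [3, 1, 2, 1]
def Spec_find (t : List Int) (out : Int) : Prop := out = find_alt t
instance (t : List Int) (out : Int) : Decidable (Spec_find t out) := by unfold Spec_find; infer_instance

-- ===== CLAIM (what is proved, stated in full; the proofs are below) =====
def Claim_equal_find : Prop := ∀ (t : List Int), Dom_find t → Pre_find t → Spec_find t (find t)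

-- ===== LEMMAS AND PROOFS =====

-- A's second loop, abstracted over the count function c
def pvStep (c : Int → Int) (a x : Int) : Int := if c x < c a ∨ c x = c a then x else a

-- running minimum of c over a :: l
def pvM (c : Int → Int) (a : Int) (l : List Int) : Int := l.foldl (fun m x => min m (c x)) (c a)

theorem pvM_le (c : Int → Int) : ∀ (l : List Int) (a : Int),
    pvM c a l ≤ c a ∧ ∀ y ∈ l, pvM c a l ≤ c y := by
  intro l
  induction l with
  | nil => intro a; exact ⟨le_refl _, by simp⟩
  | cons x l ih =>
    intro a
    have h := ih (pvStep c a x)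
    have hc : c (pvStep c a x) = min (c a) (c x) := by
      unfold pvStep; split_ifs with h1 <;> omega
    have hM : pvM c a (x :: l) = pvM c (pvStep c a x) l := by
      unfold pvM; simp [List.foldl, hc]
    rw [hM]
    refine ⟨?_, ?_⟩
    · exact le_trans h.1 (by omega)
    · intro y hy
      rcases List.mem_cons.mp hy with rfl | hy
      · exact le_trans h.1 (by omega)
      · exact h.2 y hy

theorem pvM_attained (c : Int → Int) : ∀ (l : List Int) (a : Int),
    pvM c a l = c a ∨ ∃ y ∈ l, pvM c a l = c y := by
  intro l
  induction l with
  | nil => intro a; left; rfl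
  | cons x l ih =>
    intro a
    have hc : c (pvStep c a x) = min (c a) (c x) := by
      unfold pvStep; split_ifs with h1 <;> omega
    have hM : pvM c a (x :: l) = pvM c (pvStep c a x) l := by
      unfold pvM; simp [List.foldl, hc]
    rw [hM]
    rcases ih (pvStep c a x) with h | ⟨y, hy, hEq⟩
    · by_cases hle : c x < c a ∨ c x = c a
      · right; exact ⟨x, List.mem_cons_self, by rw [h]; unfold pvStep; rw [if_pos hle]⟩
      · left; rw [h]; unfold pvStep; rw [if_neg hle]
    · right; exact ⟨y, List.mem_cons_of_mem _ hy, hEq⟩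

theorem pvFoldA_eq_findRev (c : Int → Int) : ∀ (l : List Int) (a : Int),
    l.foldl (pvStep c) a = (l.reverse.find? (fun x => c x == pvM c a l)).getD a := by
  intro l
  induction l with
  | nil => intro a; rfl
  | cons x l ih =>
    intro a
    have hc : c (pvStep c a x) = min (c a) (c x) := by
      unfold pvStep; split_ifs with h1 <;> omega
    have hM : pvM c a (x :: l) = pvM c (pvStep c a x) l := by
      unfold pvM; simp [List.foldl, hc]
    have hL : (x :: l).foldl (pvStep c) a = l.foldl (pvStep c) (pvStep c a x) := rfl
    rw [hL, ih, hM]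
    rw [show (x :: l).reverse = l.reverse ++ [x] from by simp]
    rw [List.find?_append]
    cases hfind : l.reverse.find? (fun y => c y == pvM c (pvStep c a x) l) with
    | some y => simp
    | none =>
      have hnone : ∀ y ∈ l, c y ≠ pvM c (pvStep c a x) l := by
        intro y hy
        have := List.find?_eq_none.mp hfind y (List.mem_reverse.mpr hy)
        simpa using this
      have hmm : pvM c (pvStep c a x) l = c (pvStep c a x) := by
        rcases pvM_attained c l (pvStep c a x) with h | ⟨y, hy, hEq⟩
        · exact h
        · exact absurd hEq.symm (hnone y hy)
      simp only [Option.none_or, List.find?_singleton, Option.getD_none]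
      by_cases hle : c x < c a ∨ c x = c a
      · have hx : pvStep c a x = x := by unfold pvStep; rw [if_pos hle]
        have hbeq : (c x == pvM c (pvStep c a x) l) = true := by
          rw [hmm, hx]; exact beq_self_eq_true _
        rw [hbeq]
        simp [hx]
      · have hx : pvStep c a x = a := by unfold pvStep; rw [if_neg hle]
        have hbeq : (c x == pvM c (pvStep c a x) l) = false := by
          rw [hmm, hx]
          simp only [beq_eq_false_iff_ne, ne_eq]
          omega
        rw [hbeq]
        simp [hx]

-- A's counting loop computes the occurrence count
theorem pvFoldA_count (v : Int) : ∀ (l : List Int) (d : PySem.Dict Int Int),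
    (l.foldl (fun d x =>
      let d := if d.contains x = false then d.insert x (0 : Int) else d
      d.insert x (d.getD x 0 + 1)) d).getD v 0 = d.getD v 0 + l.count v := by
  intro l
  induction l with
  | nil => intro d; simp
  | cons x l ih =>
    intro d
    rw [List.foldl_cons, ih]
    have hstep : ((let d' := if d.contains x = false then d.insert x (0 : Int) else d
        d'.insert x (d'.getD x 0 + 1)).getD v 0) =
        if v = x then d.getD v 0 + 1 else d.getD v 0 := by
      by_cases hcon : d.contains x = false
      · have h0 : d.getD x 0 = 0 := PySem.Dict.getD_of_not_contains _ _ hcon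
        by_cases hvx : v = x
        · subst hvx; simp [hcon, PySem.Dict.getD_insert, h0]
        · simp [hcon, PySem.Dict.getD_insert, hvx]
      · have hcon' : d.contains x = true := by simpa using hcon
        by_cases hvx : v = x
        · subst hvx; simp [hcon', PySem.Dict.getD_insert]
        · simp [hcon', PySem.Dict.getD_insert, hvx]
    rw [hstep, List.count_cons]
    by_cases hvx : v = x
    · subst hvx; simp; push_cast; ring
    · simp [hvx, Ne.symm hvx]

theorem find_spec_aux (t : List Int) (ht : t ≠ []) : find t = find_alt t := by
  obtain ⟨t0, rest, rfl⟩ := List.exists_cons_of_ne_nil ht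
  set t := t0 :: rest with htdef
  -- the count function
  set c : Int → Int := fun v => (t.count v : Int) with hc
  -- A's dict counts occurrences
  have hdA : ∀ v, (t.foldl (fun d x =>
      let d := if d.contains x = false then d.insert x (0 : Int) else d
      d.insert x (d.getD x 0 + 1)) PySem.Dict.empty).getD v 0 = c v := by
    intro v; rw [pvFoldA_count]; simp [hc, PySem.Dict.getD_empty]
  -- B's dict is the counter
  have hdB : (t.foldl (fun d x => d.insert x (d.getD x 0 + 1))
      (PySem.Dict.empty : PySem.Dict Int Int)) = PySem.Dict.counter t :=
    PySem.Dict.foldl_insert_getD_add_one_eq_counter t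
  -- A unfolded
  have hA : find t = (t.reverse.find? (fun x => c x == pvM c t0 t)).getD t0 := by
    unfold find
    simp only []
    have hfun : (fun least x =>
        if (t.foldl (fun d x =>
          let d := if d.contains x = false then d.insert x (0 : Int) else d
          d.insert x (d.getD x 0 + 1)) PySem.Dict.empty).getD x 0 <
           (t.foldl (fun d x =>
          let d := if d.contains x = false then d.insert x (0 : Int) else d
          d.insert x (d.getD x 0 + 1)) PySem.Dict.empty).getD least 0 ∨
           (t.foldl (fun d x =>
          let d := if d.contains x = false then d.insert x (0 : Int) else d
          d.insert x (d.getD x 0 + 1)) PySem.Dict.empty).getD x 0 =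
           (t.foldl (fun d x =>
          let d := if d.contains x = false then d.insert x (0 : Int) else d
          d.insert x (d.getD x 0 + 1)) PySem.Dict.empty).getD least 0
        then x else least) = pvStep c := by
      funext a x
      unfold pvStep
      rw [hdA, hdA]
    rw [hfun]
    have h0 : PySem.List.pyGetD t 0 0 = t0 := by
      rw [htdef]; exact PySem.List.pyGetD_zero_cons t0 rest 0
    rw [h0]
    exact pvFoldA_eq_findRev c t t0
  -- B's minimum equals pvM c t0 t
  have ht0mem : t0 ∈ t := by rw [htdef]; exact List.mem_cons_self
  have hle := pvM_le c t t0
  have hvalues : (PySem.Dict.counter t : PySem.Dict Int Int).values =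
      (PySem.Set.ofList t).map (fun k => (t.count k : Int)) := by
    show ((PySem.Dict.counter t).items.map (·.2)) = _
    rw [PySem.Dict.items_counter]
    simp [List.map_map, Function.comp]
  have hmem_values : ∀ v, v ∈ (PySem.Dict.counter t : PySem.Dict Int Int).values ↔
      ∃ k ∈ t, v = c k := by
    intro v
    rw [hvalues]
    simp only [List.mem_map]
    constructor
    · rintro ⟨k, hk, rfl⟩
      exact ⟨k, (PySem.Set.mem_ofList _ _).mp hk, rfl⟩
    · rintro ⟨k, hk, rfl⟩
      exact ⟨k, (PySem.Set.mem_ofList _ _).mpr hk, rfl⟩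
  have hvne : (PySem.Dict.counter t : PySem.Dict Int Int).values ≠ [] := by
    intro h
    have : c t0 ∈ (PySem.Dict.counter t : PySem.Dict Int Int).values :=
      (hmem_values _).mpr ⟨t0, ht0mem, rfl⟩
    rw [h] at this; exact absurd this (List.not_mem_nil)
  obtain ⟨m, hm⟩ : ∃ m, PySem.List.min?
      (PySem.Dict.counter t : PySem.Dict Int Int).values (fun v => v) = some m := by
    cases h : PySem.List.min? (PySem.Dict.counter t : PySem.Dict Int Int).values (fun v => v) with
    | none => exact absurd ((PySem.List.min?_eq_none_iff _ _).mp h) hvne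
    | some m => exact ⟨m, rfl⟩
  have hmM : m = pvM c t0 t := by
    have hmmem := PySem.List.min?_mem hm
    have hmmin := PySem.List.min?_isMin hm
    obtain ⟨k, hk, hkeq⟩ := (hmem_values m).mp hmmem
    apply le_antisymm
    · -- m ≤ pvM : pvM is attained as c y for some y in t0 :: rest ⊆ t
      rcases pvM_attained c t t0 with h | ⟨y, hy, hEq⟩
      · rw [h]
        exact hmmin (c t0) ((hmem_values _).mpr ⟨t0, ht0mem, rfl⟩)
      · rw [hEq]
        exact hmmin (c y) ((hmem_values _).mpr ⟨y, hy, rfl⟩)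
    · rw [hkeq]; exact hle.2 k hk
  -- B unfolded
  have hB : find_alt t = (t.reverse.find? (fun x => c x == pvM c t0 t)).getD 0 := by
    unfold find_alt
    show ((t.reverse.find? (fun x =>
        (List.foldl (fun d x => d.insert x (d.getD x 0 + 1))
          (PySem.Dict.empty : PySem.Dict Int Int) t).getD x 0 ==
        (PySem.List.min? (List.foldl (fun d x => d.insert x (d.getD x 0 + 1))
          (PySem.Dict.empty : PySem.Dict Int Int) t).values (fun v => v)).getD 0)).getD 0) = _
    rw [hdB, hm]
    simp only [Option.getD_some, hmM, PySem.Dict.getD_counter, hc]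
  -- the find? succeeds: pvM is attained in t, hence in t.reverse
  rw [hA, hB]
  obtain ⟨y, hy, hEq⟩ : ∃ y ∈ t, pvM c t0 t = c y := by
    rcases pvM_attained c t t0 with h | h
    · exact ⟨t0, ht0mem, h⟩
    · exact h
  obtain ⟨v, hv⟩ : ∃ v, t.reverse.find? (fun x => c x == pvM c t0 t) = some v := by
    cases h : t.reverse.find? (fun x => c x == pvM c t0 t) with
    | none =>
      have := List.find?_eq_none.mp h y (List.mem_reverse.mpr hy)
      simp [hEq] at this
    | some v => exact ⟨v, rfl⟩
  rw [hv]
  rfl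

-- ===== VERDICT (by name: the statement is the Claim_ definition above) =====
theorem find_spec : Claim_equal_find := by
  intro t _ ht
  unfold Spec_find
  exact find_spec_aux t ht
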